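-- pv_equiv track=rewrite | github.com/katuneko/icfpc2006 | ant_solver.py | fill_program_template
-- ===== SOURCE A (Python) =====
-- from typing import Dict, Iterable, List, Optional, Tuple
--
-- DIRS = "NESW"
--
-- DIR_TO_IDX = {"N": 0, "E": 1, "S": 2, "W": 3}
--
-- def fill_program_template(
--     template: str,
--     p1: Optional[int] = None,
--     apply_p1: bool = False,
-- ) -> str:
--     if len(template) < 7:
--         raise ValueError(f"unsupported program length: {template!r}")
--     out = []
--     for i, ch in enumerate(template):
--         if ch == "*":
--             if apply_p1 and i == 0:
--                 if p1 is None: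
--                     raise ValueError("p1 is required when apply_p1 is true")
--                 out.append(DIRS[p1])
--             else:
--                 out.append("N")
--             continue
--         if ch not in DIR_TO_IDX:
--             raise ValueError(f"invalid program char: {ch!r}")
--         out.append(ch)
--     return "".join(out)
-- ===== SOURCE B (Python) =====
-- DIRS = "NESW"
--
-- DIR_TO_IDX = {"N": 0, "E": 1, "S": 2, "W": 3}
--
-- def fill_program_template(template, p1=None, apply_p1=False):
--     if len(template) < 7:
--         raise ValueError(f"unsupported program length: {template!r}")
--     bad = next((c for c in template if c not in "NESW*"), None)
--     if bad is not None:
--         raise ValueError(f"invalid program char: {bad!r}")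
--     head = template[0]
--     if head == "*":
--         if apply_p1:
--             if p1 is None:
--                 raise ValueError("p1 is required when apply_p1 is true")
--             head = DIRS[p1]
--         else:
--             head = "N"
--     return head + "".join("N" if c == "*" else c for c in template[1:])
-- ===== Notes on version B (the rewrite author's own statement) =====
-- stated objective: idiomatic
-- what changed: Replaced the interleaved per-index loop (enumerate + per-char branch on i==0 and dict membership) with a separate left-to-right validation scan, a specially handled first character, and a bulk '*'->'N' substitution of the tail.
import Mathlib
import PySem

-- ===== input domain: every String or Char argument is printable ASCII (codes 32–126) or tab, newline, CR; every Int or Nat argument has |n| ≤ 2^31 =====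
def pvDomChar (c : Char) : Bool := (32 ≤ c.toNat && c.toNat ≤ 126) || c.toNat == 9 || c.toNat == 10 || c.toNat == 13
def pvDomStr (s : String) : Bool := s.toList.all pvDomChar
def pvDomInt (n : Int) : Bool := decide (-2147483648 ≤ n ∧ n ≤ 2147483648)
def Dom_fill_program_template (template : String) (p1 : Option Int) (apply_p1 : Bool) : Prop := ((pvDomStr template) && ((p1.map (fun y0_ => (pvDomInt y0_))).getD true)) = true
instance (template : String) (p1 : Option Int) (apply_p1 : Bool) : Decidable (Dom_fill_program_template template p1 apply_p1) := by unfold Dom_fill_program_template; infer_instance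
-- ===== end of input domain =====

-- B is a more idiomatic decomposition: validate first, then substitute; same values wherever A returns.

-- ===== PORT A =====
-- DIR_TO_IDX = {"N": 0, "E": 1, "S": 2, "W": 3}
def fptDict : PySem.Dict Char Int := PySem.Dict.ofList [('N', 0), ('E', 1), ('S', 2), ('W', 3)]

-- the body of A's for-loop; `none` marks a raise
def fptStep (p1 : Option Int) (apply_p1 : Bool) (acc : Option (List Char)) (p : Int × Char) : Option (List Char) :=
  match acc with
  | none => none
  | some l =>
    if p.2 = '*' then
      if apply_p1 && p.1 == 0 then
        match p1 with
        | none => none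
        | some v =>
          match PySem.Str.pyGet? "NESW" v with
          | none => none
          | some c => some (l ++ [c])
      else some (l ++ ['N'])
    else if (PySem.Dict.get? fptDict p.2).isSome then some (l ++ [p.2])
    else none

def fill_program_template (template : String) (p1 : Option Int) (apply_p1 : Bool) : String :=
  let cs := template.toList
  if cs.length < 7 then ""   -- A raises ValueError here; outside Pre_
  else
    match (PySem.List.enumerate cs 0).foldl (fptStep p1 apply_p1) (some []) with
    | none => ""             -- A raises ValueError here; outside Pre_
    | some l => String.mk l

-- ===== PORT B =====
def fill_program_template_alt (template : String) (p1 : Option Int) (apply_p1 : Bool) : String :=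
  let cs := template.toList
  if cs.length < 7 then ""   -- raise; outside Pre_
  else
    match cs.find? (fun c => !("NESW*".toList.contains c)) with
    | some _ => ""           -- raise (invalid char); outside Pre_
    | none =>
      let tail := (PySem.List.slice cs (some 1) none).map (fun c => if c = '*' then 'N' else c)
      match PySem.List.pyGet? cs 0 with
      | none => ""           -- unreachable: cs nonempty
      | some h =>
        if h = '*' then
          if apply_p1 then
            match p1 with
            | none => ""     -- raise; outside Pre_
            | some v =>
              match PySem.Str.pyGet? "NESW" v with
              | none => ""   -- raise (IndexError); outside Pre_
              | some c => String.mk (c :: tail)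
          else String.mk ('N' :: tail)
        else String.mk (h :: tail)

-- ===== PRECONDITION & SPEC =====
-- Pre_ excludes exactly the inputs on which A raises: strings shorter than 7, strings with a
-- character outside "NESW*", and a leading '*' under apply_p1 with p1 missing or outside [-4,3].
def Pre_fill_program_template (template : String) (p1 : Option Int) (apply_p1 : Bool) : Prop :=
  7 ≤ template.toList.length ∧
  (template.toList.all (fun c => c == 'N' || c == 'E' || c == 'S' || c == 'W' || c == '*')) = true ∧
  (apply_p1 = true → template.toList.head? = some '*' →
    p1 ≠ none ∧ -4 ≤ p1.getD 0 ∧ p1.getD 0 < 4)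

instance (template : String) (p1 : Option Int) (apply_p1 : Bool) : Decidable (Pre_fill_program_template template p1 apply_p1) := by unfold Pre_fill_program_template; infer_instance

def pvWitness_fill_program_template : String × Option Int × Bool := ("*NSEWNN", some 2, true)

def Spec_fill_program_template (template : String) (p1 : Option Int) (apply_p1 : Bool) (out : String) : Prop := out = fill_program_template_alt template p1 apply_p1
instance (template : String) (p1 : Option Int) (apply_p1 : Bool) (out : String) : Decidable (Spec_fill_program_template template p1 apply_p1 out) := by unfold Spec_fill_program_template; infer_instance

-- ===== CLAIM (what is proved, stated in full; the proofs are below) =====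
def Claim_equal_fill_program_template : Prop := ∀ (template : String) (p1 : Option Int) (apply_p1 : Bool), Dom_fill_program_template template p1 apply_p1 → Pre_fill_program_template template p1 apply_p1 → Spec_fill_program_template template p1 apply_p1 (fill_program_template template p1 apply_p1)

-- ===== LEMMAS AND PROOFS =====

theorem fptDict_get_isSome (c : Char) (h : c = 'N' ∨ c = 'E' ∨ c = 'S' ∨ c = 'W') :
    (PySem.Dict.get? fptDict c).isSome = true := by
  rcases h with h | h | h | h <;> subst h <;> decide

-- A's loop on indices ≥ 1 over valid characters just maps '*' to 'N' and keeps the rest.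
theorem fptStep_foldl_tail (p1 : Option Int) (apply_p1 : Bool) (t : List Char) :
    ∀ (s : Int) (l : List Char), 1 ≤ s →
    (∀ c ∈ t, c = 'N' ∨ c = 'E' ∨ c = 'S' ∨ c = 'W' ∨ c = '*') →
    (PySem.List.enumerate t s).foldl (fptStep p1 apply_p1) (some l)
      = some (l ++ t.map (fun c => if c = '*' then 'N' else c)) := by
  induction t with
  | nil => intro s l _ _; simp [PySem.List.enumerate]
  | cons c t ih =>
    intro s l hs hv
    have hc := hv c (by simp)
    have hsz : (s == 0) = false := by simp; omega
    have hstep : fptStep p1 apply_p1 (some l) (s, c)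
        = some (l ++ [if c = '*' then 'N' else c]) := by
      by_cases hc' : c = '*'
      · simp [fptStep, hc', hsz]
      · have hg := fptDict_get_isSome c (by tauto)
        simp [fptStep, hc', hg]
    rw [PySem.List.enumerate_cons, List.foldl_cons, hstep,
        ih (s + 1) _ (by omega) (fun x hx => hv x (by simp [hx]))]
    simp

theorem fill_program_template_spec : Claim_equal_fill_program_template := by
  intro template p1 apply_p1 _ hpre
  obtain ⟨hlen, hvalidb, hp1⟩ := hpre
  have hvalid : ∀ c ∈ template.toList, c = 'N' ∨ c = 'E' ∨ c = 'S' ∨ c = 'W' ∨ c = '*' := by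
    intro c hc
    have := List.all_eq_true.mp hvalidb c hc
    simp at this
    tauto
  unfold Spec_fill_program_template fill_program_template fill_program_template_alt
  obtain ⟨h, t, hcs⟩ : ∃ h t, template.toList = h :: t := by
    cases hct : template.toList with
    | nil => rw [hct] at hlen; simp at hlen
    | cons a b => exact ⟨a, b, rfl⟩
  rw [hcs] at hlen hvalid hp1 ⊢
  clear hvalidb
  have hnlt : ¬ ((h :: t).length < 7) := by simp at hlen ⊢; omega
  have hfind : (h :: t).find? (fun c => !("NESW*".toList.contains c)) = none := by
    rw [List.find?_eq_none]
    intro c hc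
    rcases hvalid c hc with h' | h' | h' | h' | h' <;> simp [h']
  have hvt : ∀ c ∈ t, c = 'N' ∨ c = 'E' ∨ c = 'S' ∨ c = 'W' ∨ c = '*' := by
    intro c hc; exact hvalid c (by simp [hc])
  simp only [if_neg hnlt, hfind, PySem.List.pyGet?_zero_cons,
    PySem.List.slice_from_one, List.tail_cons,
    PySem.List.enumerate_cons, List.foldl_cons, zero_add]
  by_cases hstar : h = '*'
  · subst hstar
    cases apply_p1 with
    | true =>
      obtain ⟨hp1n, hlo, hhi⟩ := hp1 rfl rfl
      obtain ⟨v, hv⟩ : ∃ v, p1 = some v := by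
        cases p1 with
        | none => exact absurd rfl hp1n
        | some v => exact ⟨v, rfl⟩
      subst hv
      simp only [Option.getD_some] at hlo hhi
      obtain ⟨c, hc⟩ : ∃ c, PySem.List.pyGet? ['N', 'E', 'S', 'W'] v = some c := by
        interval_cases v <;> exact ⟨_, rfl⟩
      have hs1 : fptStep (some v) true (some []) ((0 : Int), '*') = some [c] := by
        simp [fptStep, hc]
      rw [hs1, fptStep_foldl_tail (some v) true t 1 [c] (by omega) hvt]
      simp [hc]
    | false =>
      have hs1 : fptStep p1 false (some []) ((0 : Int), '*') = some ['N'] := by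
        simp [fptStep]
      rw [hs1, fptStep_foldl_tail p1 false t 1 ['N'] (by omega) hvt]
      simp
  · have hg := fptDict_get_isSome h
      (by rcases hvalid h (by simp) with h' | h' | h' | h' | h' <;> tauto)
    have hs1 : fptStep p1 apply_p1 (some []) ((0 : Int), h) = some [h] := by
      simp [fptStep, hstar, hg]
    rw [hs1, fptStep_foldl_tail p1 apply_p1 t 1 [h] (by omega) hvt]
    simp [hstar]
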